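-- pv_equiv track=rewrite | github.com/adsabs/entity_extractor | optimized_extractor/extraction_engine.py | extract_context_window
-- ===== SOURCE A (Python) =====
-- def extract_context_window(text: str, match_start: int, match_end: int,
--                          window_words: int = 100) -> str:
--     """Extract context window of specified word count around match."""
--     # Simple word tokenization
--     words = text.split()
--
--     # Find word positions
--     char_to_word = {}
--     char_pos = 0
--     for word_idx, word in enumerate(words):
--         for i in range(len(word)):
--             char_to_word[char_pos + i] = word_idx
--         char_pos += len(word) + 1  # +1 for space
--
--     # Get word indices for match
--     start_word_idx = char_to_word.get(match_start, 0)
--     end_word_idx = char_to_word.get(match_end - 1, len(words) - 1)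
--
--     # Extract window
--     context_start = max(0, start_word_idx - window_words)
--     context_end = min(len(words), end_word_idx + window_words + 1)
--
--     return ' '.join(words[context_start:context_end])
-- ===== SOURCE B (Python) =====
-- def extract_context_window(text: str, match_start: int, match_end: int,
--                            window_words: int = 100) -> str:
--     """Extract context window of specified word count around match."""
--     words = text.split()
--     n = len(words)
--
--     def locate(pos, default):
--         # walk the words once; word i spans [offset, offset + len(word)) in the
--         # space-normalised layout, with one space between consecutive words
--         offset = 0
--         for i, w in enumerate(words):
--             if pos < offset:
--                 break
--             if pos < offset + len(w):
--                 return i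
--             offset += len(w) + 1
--         return default
--
--     start_word_idx = locate(match_start, 0)
--     end_word_idx = locate(match_end - 1, n - 1)
--
--     context_start = max(0, start_word_idx - window_words)
--     context_end = min(n, end_word_idx + window_words + 1)
--
--     return ' '.join(words[context_start:context_end])
-- ===== Notes on version B (the rewrite author's own statement) =====
-- stated objective: faster
-- what changed: Replaces A's per-character dict (one hash insertion for every character of every word) with a direct O(W) positional scan over word offsets, removing the char_to_word mapping entirely.
import Mathlib
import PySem

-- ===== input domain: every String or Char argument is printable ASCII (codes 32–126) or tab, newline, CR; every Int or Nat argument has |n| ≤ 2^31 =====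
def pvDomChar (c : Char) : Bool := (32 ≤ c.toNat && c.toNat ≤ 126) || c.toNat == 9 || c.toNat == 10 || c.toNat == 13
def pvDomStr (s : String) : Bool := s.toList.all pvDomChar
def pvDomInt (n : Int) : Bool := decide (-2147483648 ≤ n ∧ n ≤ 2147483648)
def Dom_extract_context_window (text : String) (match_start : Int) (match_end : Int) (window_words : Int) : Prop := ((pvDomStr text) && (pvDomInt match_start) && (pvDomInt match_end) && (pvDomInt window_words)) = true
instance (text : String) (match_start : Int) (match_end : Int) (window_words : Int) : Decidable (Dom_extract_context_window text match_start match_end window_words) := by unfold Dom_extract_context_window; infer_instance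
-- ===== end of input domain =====

-- B replaces A's per-character char_to_word dict with a single positional scan over the
-- word list (constant-factor speed-up: no per-character hash insertions). Return values agree everywhere.

-- ===== PORT A =====
-- the 'for word_idx, word in enumerate(words)' loop: state = (char_to_word, char_pos)
def pvBuildDict : List (Int × String) → PySem.Dict Int Int × Int → PySem.Dict Int Int × Int
  | [], st => st
  | p :: rest, st =>
      pvBuildDict rest
        ((PySem.List.pyRange 0 (PySem.Str.len p.2) 1).foldl
            (fun dd i => dd.insert (st.2 + i) p.1) st.1,
         st.2 + PySem.Str.len p.2 + 1)

def extract_context_window (text : String) (match_start : Int) (match_end : Int) (window_words : Int) : String :=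
  let words := PySem.Str.split₀ text
  let st := pvBuildDict (PySem.List.enumerate words 0) (PySem.Dict.empty, 0)
  let start_word_idx := st.1.getD match_start 0
  let end_word_idx := st.1.getD (match_end - 1) ((words.length : Int) - 1)
  let context_start := max 0 (start_word_idx - window_words)
  let context_end := min ((words.length : Int)) (end_word_idx + window_words + 1)
  PySem.Str.join " " (PySem.List.slice words (some context_start) (some context_end))

-- ===== PORT B =====
-- B's locate(): walk the words once, word at index idx spans [offset, offset + len w)
def pvLocate : List String → Int → Int → Int → Int → Int
  | [], _, _, _, dflt => dflt
  | w :: rest, offset, idx, pos, dflt =>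
      if pos < offset then dflt
      else if pos < offset + PySem.Str.len w then idx
      else pvLocate rest (offset + PySem.Str.len w + 1) (idx + 1) pos dflt

def extract_context_window_alt (text : String) (match_start : Int) (match_end : Int) (window_words : Int) : String :=
  let words := PySem.Str.split₀ text
  let n : Int := words.length
  let start_word_idx := pvLocate words 0 0 match_start 0
  let end_word_idx := pvLocate words 0 0 (match_end - 1) (n - 1)
  let context_start := max 0 (start_word_idx - window_words)
  let context_end := min n (end_word_idx + window_words + 1)
  PySem.Str.join " " (PySem.List.slice words (some context_start) (some context_end))

-- ===== PRECONDITION & SPEC =====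
def Spec_extract_context_window (text : String) (match_start : Int) (match_end : Int) (window_words : Int) (out : String) : Prop := out = extract_context_window_alt text match_start match_end window_words
instance (text : String) (match_start : Int) (match_end : Int) (window_words : Int) (out : String) : Decidable (Spec_extract_context_window text match_start match_end window_words out) := by unfold Spec_extract_context_window; infer_instance

-- ===== CLAIM (what is proved, stated in full; the proofs are below) =====
def Claim_equal_extract_context_window : Prop := ∀ (text : String) (match_start : Int) (match_end : Int) (window_words : Int), Dom_extract_context_window text match_start match_end window_words → Spec_extract_context_window text match_start match_end window_words (extract_context_window text match_start match_end window_words)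

-- ===== LEMMAS AND PROOFS =====

-- the inner 'for i in range(len(word))' loop inserts exactly the keys c+a … c+b-1
theorem pvInner_getD (c idx : Int) : ∀ (n : Nat) (a b : Int), (b - a).toNat = n →
    ∀ (d : PySem.Dict Int Int) (q dflt : Int),
    ((PySem.List.pyRange a b 1).foldl (fun dd i => dd.insert (c + i) idx) d).getD q dflt
      = if c + a ≤ q ∧ q < c + b then idx else d.getD q dflt := by
  intro n
  induction n with
  | zero =>
      intro a b h d q dflt
      rw [PySem.List.pyRange_one_eq_nil (by omega)]
      simp only [List.foldl_nil]
      rw [if_neg (by omega)]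
  | succ m ih =>
      intro a b h d q dflt
      rw [PySem.List.pyRange_one_cons (by omega)]
      simp only [List.foldl_cons]
      rw [ih (a + 1) b (by omega)]
      rw [PySem.Dict.getD_insert]
      split_ifs with h1 h2 h3 h3 h2 <;> first | rfl | omega

theorem pvLocate_lt (ws : List String) (offset idx pos dflt : Int) (h : pos < offset) :
    pvLocate ws offset idx pos dflt = dflt := by
  cases ws with
  | nil => rfl
  | cons w rest => simp [pvLocate, h]

theorem pvStrLen_nonneg (s : String) : 0 ≤ PySem.Str.len s := by
  simp [PySem.Str.len_eq]

theorem pvBuild_getD : ∀ (ws : List String) (k : Int) (st : PySem.Dict Int Int × Int)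
    (q dflt : Int), (∀ (j d0 : Int), st.2 ≤ j → st.1.getD j d0 = d0) →
    (pvBuildDict (PySem.List.enumerate ws k) st).1.getD q dflt
      = if q < st.2 then st.1.getD q dflt else pvLocate ws st.2 k q dflt := by
  intro ws
  induction ws with
  | nil =>
      intro k st q dflt hinv
      simp only [PySem.List.enumerate_nil, pvBuildDict, pvLocate]
      split_ifs with h
      · rfl
      · exact hinv q dflt (by omega)
  | cons w rest ih =>
      intro k st q dflt hinv
      rw [PySem.List.enumerate_cons]
      simp only [pvBuildDict]
      have hL : 0 ≤ PySem.Str.len w := pvStrLen_nonneg w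
      have hlen : (PySem.Str.len w - 0).toNat = (PySem.Str.len w).toNat := by omega
      have hinner := pvInner_getD st.2 k (PySem.Str.len w).toNat 0 (PySem.Str.len w) hlen st.1
      have hinv' : ∀ (j d0 : Int), st.2 + PySem.Str.len w + 1 ≤ j →
          ((PySem.List.pyRange 0 (PySem.Str.len w) 1).foldl
            (fun dd i => dd.insert (st.2 + i) k) st.1).getD j d0 = d0 := by
        intro j d0 hj
        rw [hinner j d0, if_neg (by omega)]
        exact hinv j d0 (by omega)
      rw [ih (k + 1) _ q dflt hinv']
      simp only [hinner, pvLocate]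
      by_cases hgap : st.2 + PySem.Str.len w ≤ q ∧ q < st.2 + PySem.Str.len w + 1
      · rw [if_pos (by omega : q < st.2 + PySem.Str.len w + 1), if_neg (by omega),
          hinv q dflt (by omega), if_neg (by omega : ¬ q < st.2), if_neg (by omega),
          pvLocate_lt rest _ _ _ _ (by omega),
          if_neg (by omega : ¬ q < st.2 + PySem.Str.len w)]
      · split_ifs <;> first | rfl | omega

theorem pvDict_eq_locate (ws : List String) (q dflt : Int) :
    (pvBuildDict (PySem.List.enumerate ws 0) (PySem.Dict.empty, 0)).1.getD q dflt
      = pvLocate ws 0 0 q dflt := by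
  rw [pvBuild_getD ws 0 (PySem.Dict.empty, 0) q dflt
      (by intro j d0 _; exact PySem.Dict.getD_empty ..)]
  split_ifs with h
  · rw [PySem.Dict.getD_empty, pvLocate_lt ws 0 0 q dflt (by omega)]
  · rfl

-- ===== VERDICT (by name: the statement is the Claim_ definition above) =====
theorem extract_context_window_spec : Claim_equal_extract_context_window := by
  intro text match_start match_end window_words _
  show _ = _
  simp only [extract_context_window, extract_context_window_alt]
  rw [pvDict_eq_locate, pvDict_eq_locate]
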